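-- pv_equiv track=rewrite | github.com/sUhAs1011/C3I | career_advisor.py | normalize_skill_list
-- ===== SOURCE A (Python) =====
-- def normalize_skill(skill_text, normalization_map):
--     """Normalizes a single skill string."""
--     if not isinstance(skill_text, str):
--         return "" # Or handle as an error/log
--     cleaned_skill = skill_text.lower().strip()
--     return normalization_map.get(cleaned_skill, cleaned_skill) # Return mapped value or original cleaned skill
--
-- def normalize_skill_list(skills, normalization_map):
--     """Normalizes a list of skill strings and returns a list of unique canonical skills."""
--     if not skills:
--         return []
--
--     # Handle cases where 'skills' might be a single string instead of a list (e.g. from bad CSV parsing before splitting)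
--     if isinstance(skills, str):
--         # This assumes skills in a string are comma-separated if not already a list
--         # This is a fallback; ideally, the input 'skills' should already be a list of strings.
--         skills = [s.strip() for s in skills.split(',') if s.strip()]
--
--     normalized_set = set()
--     for skill in skills:
--         if isinstance(skill, str): # Ensure each item in the list is a string
--             normalized_set.add(normalize_skill(skill, normalization_map))
--         # else: log or handle non-string item
--     return sorted(list(normalized_set))
-- ===== SOURCE B (Python) =====
-- def normalize_skill(skill_text, normalization_map):
--     if not isinstance(skill_text, str):
--         return ""
--     cleaned_skill = skill_text.lower().strip()
--     return normalization_map.get(cleaned_skill, cleaned_skill)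
--
-- def _insert_unique(out, v):
--     """Insert v into the sorted-unique list out, keeping it sorted and unique.
--     Scans from the front for the first element not below v."""
--     i = 0
--     while i < len(out) and out[i] < v:
--         i += 1
--     if i == len(out) or out[i] != v:
--         out.insert(i, v)
--     return out
--
-- def normalize_skill_list(skills, normalization_map):
--     """Sorted unique canonical skills via incremental ordered insertion:
--     no set and no final sort; the output list is kept sorted & unique throughout."""
--     if not skills:
--         return []
--     if isinstance(skills, str):
--         skills = [s.strip() for s in skills.split(',') if s.strip()]
--     out = []
--     for skill in skills:
--         if isinstance(skill, str):
--             out = _insert_unique(out, normalize_skill(skill, normalization_map))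
--     return out
-- ===== Notes on version B (the rewrite author's own statement) =====
-- stated objective: alternative
-- what changed: Replaces the hash-set accumulation followed by sorted(list(set)) with incremental ordered insertion: each normalized value is inserted into its sorted position of the output list (skipped if already present), so no set and no sorting step exist.
import Mathlib
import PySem

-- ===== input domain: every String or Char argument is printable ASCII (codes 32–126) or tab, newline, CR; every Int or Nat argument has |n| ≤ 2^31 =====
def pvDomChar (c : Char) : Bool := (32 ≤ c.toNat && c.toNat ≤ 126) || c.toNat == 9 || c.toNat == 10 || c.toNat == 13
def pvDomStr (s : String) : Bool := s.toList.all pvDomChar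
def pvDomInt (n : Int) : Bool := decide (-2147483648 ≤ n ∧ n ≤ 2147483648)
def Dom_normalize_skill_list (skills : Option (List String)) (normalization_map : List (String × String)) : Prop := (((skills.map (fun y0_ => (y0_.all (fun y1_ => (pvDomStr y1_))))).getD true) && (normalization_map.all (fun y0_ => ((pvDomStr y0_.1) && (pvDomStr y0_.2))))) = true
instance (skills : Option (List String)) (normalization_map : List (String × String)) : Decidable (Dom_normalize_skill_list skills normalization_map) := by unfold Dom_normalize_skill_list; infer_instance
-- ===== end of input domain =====

-- B replaces A's hash-set accumulation + sorted(list(set)) by incremental ordered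
-- insertion: each normalized value is inserted at its sorted position of the output
-- (skipped if present), so no set and no sorting step exist (objective: alternative).
-- Under the type convention 'skills : Option (List String)' the Python branches
-- 'isinstance(skills, str)' and the per-item 'isinstance(skill, str)' guard are
-- always list/str respectively, so they are the identity here (noted, not dropped).

-- ===== PORT A =====
-- helper: Python's normalize_skill (the non-str branch is unreachable under the type convention)
def pv_normalize_skill (skill_text : String) (normalization_map : List (String × String)) : String :=
  let cleaned_skill := PySem.Str.strip (PySem.Str.lower skill_text)
  (PySem.Dict.mk normalization_map).getD cleaned_skill cleaned_skill

def normalize_skill_list (skills : Option (List String)) (normalization_map : List (String × String)) : List String :=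
  match skills with
  | none => []
  | some l =>
    if l = [] then []   -- 'if not skills'
    else
      -- normalized_set = set(); for skill in skills: normalized_set.add(normalize_skill(...))
      let normalized_set : PySem.Set String :=
        l.foldl (fun s skill => PySem.Set.add s (pv_normalize_skill skill normalization_map)) PySem.Set.empty
      PySem.List.sorted normalized_set (fun x => x) false

-- ===== PORT B =====
-- Source B's _insert_unique: recursion on the head/tail decomposition of out
def pv_insert_unique (out : List String) (v : String) : List String :=
  match out with
  | [] => [v]
  | head :: tail =>
    if head < v then head :: pv_insert_unique tail v
    else if head = v then head :: tail
    else v :: head :: tail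

def normalize_skill_list_alt (skills : Option (List String)) (normalization_map : List (String × String)) : List String :=
  match skills with
  | none => []
  | some l =>
    if l = [] then []   -- 'if not skills'
    else
      -- out = []; for skill in skills: out = _insert_unique(out, normalize_skill(...))
      l.foldl (fun out skill => pv_insert_unique out (pv_normalize_skill skill normalization_map)) []

-- ===== PRECONDITION & SPEC =====
def Spec_normalize_skill_list (skills : Option (List String)) (normalization_map : List (String × String)) (out : List String) : Prop := out = normalize_skill_list_alt skills normalization_map
instance (skills : Option (List String)) (normalization_map : List (String × String)) (out : List String) : Decidable (Spec_normalize_skill_list skills normalization_map out) := by unfold Spec_normalize_skill_list; infer_instance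

-- ===== CLAIM (what is proved, stated in full; the proofs are below) =====
def Claim_equal_normalize_skill_list : Prop := ∀ (skills : Option (List String)) (normalization_map : List (String × String)), Dom_normalize_skill_list skills normalization_map → Spec_normalize_skill_list skills normalization_map (normalize_skill_list skills normalization_map)

-- ===== LEMMAS AND PROOFS =====

lemma pv_mem_insert_unique (out : List String) (v x : String) :
    x ∈ pv_insert_unique out v ↔ x ∈ out ∨ x = v := by
  induction out with
  | nil => simp [pv_insert_unique]
  | cons head tail ih =>
    unfold pv_insert_unique
    split_ifs with h1 h2
    · simp [ih, or_assoc]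
    · subst h2; simp; tauto
    · simp; tauto

lemma pv_pairwise_insert_unique (out : List String) (v : String)
    (h : out.Pairwise (· < ·)) : (pv_insert_unique out v).Pairwise (· < ·) := by
  induction out with
  | nil => simp [pv_insert_unique]
  | cons head tail ih =>
    rcases List.pairwise_cons.mp h with ⟨hhead, htail⟩
    unfold pv_insert_unique
    split_ifs with h1 h2
    · refine List.pairwise_cons.mpr ⟨?_, ih htail⟩
      intro x hx
      rcases (pv_mem_insert_unique tail v x).mp hx with hm | hm
      · exact hhead x hm
      · exact hm ▸ h1
    · exact h
    · have hv : v < head := lt_of_le_of_ne (not_lt.mp h1) (fun he => h2 he.symm)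
      refine List.pairwise_cons.mpr ⟨?_, h⟩
      intro x hx
      rcases List.mem_cons.mp hx with hm | hm
      · exact hm ▸ hv
      · exact lt_trans hv (hhead x hm)

lemma pv_fold_insert_invariant (s acc : List String) (hacc : acc.Pairwise (· < ·)) :
    (s.foldl pv_insert_unique acc).Pairwise (· < ·) ∧
    (∀ x, x ∈ s.foldl pv_insert_unique acc ↔ x ∈ acc ∨ x ∈ s) := by
  induction s generalizing acc with
  | nil => exact ⟨hacc, fun x => by simp⟩
  | cons v t ih =>
    simp only [List.foldl_cons]
    obtain ⟨h1, h2⟩ := ih (pv_insert_unique acc v) (pv_pairwise_insert_unique acc v hacc)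
    refine ⟨h1, fun x => ?_⟩
    rw [h2 x, pv_mem_insert_unique]
    simp [or_assoc, or_comm, or_left_comm]

-- core fact: sorted(set(xs)) = fold of ordered unique insertion over xs
lemma pv_sorted_set_eq_fold_insert (xs : List String) :
    PySem.List.sorted (PySem.Set.ofList xs) (fun x => x) false =
    xs.foldl pv_insert_unique [] := by
  obtain ⟨hpw, hmem⟩ := pv_fold_insert_invariant xs [] List.Pairwise.nil
  apply PySem.List.sorted_eq_of_perm_of_pairwise_lt
  · apply (List.perm_ext_iff_of_nodup ?_ ?_).mpr
    · intro a
      rw [hmem a]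
      simp [PySem.Set.mem_ofList]
    · exact hpw.imp ne_of_lt
    · exact PySem.Set.nodup_ofList xs
  · exact hpw

-- ===== VERDICT (by name: the statement is the Claim_ definition above) =====
theorem normalize_skill_list_spec : Claim_equal_normalize_skill_list := by
  intro skills m _
  unfold Spec_normalize_skill_list normalize_skill_list normalize_skill_list_alt
  match skills with
  | none => rfl
  | some l =>
    by_cases hl : l = []
    · simp [hl]
    · simp only [hl, ite_false]
      have hset : l.foldl (fun s skill => PySem.Set.add s (pv_normalize_skill skill m)) PySem.Set.empty
          = PySem.Set.ofList (l.map (fun skill => pv_normalize_skill skill m)) := by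
        rw [PySem.Set.ofList_eq_foldl, List.foldl_map]
        rfl
      have hins : l.foldl (fun out skill => pv_insert_unique out (pv_normalize_skill skill m)) []
          = (l.map (fun skill => pv_normalize_skill skill m)).foldl pv_insert_unique [] := by
        rw [List.foldl_map]
      rw [hset, hins, pv_sorted_set_eq_fold_insert]
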